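-- pv_equiv track=rewrite | github.com/lanefiedler731-gif/Infinitely-Scalable-Recursive-Model | train.py | _create_layer_mapping
-- ===== SOURCE A (Python) =====
-- from typing import Optional, Dict, Any, Tuple, List
--
-- def _create_layer_mapping(old_n_layers: int, insertion_positions: List[int]) -> Dict[int, int]:
--     """Create mapping from old layer indices to new layer indices.
--
--     Insertion positions refer to "insert after this old layer index".
--     """
--     old_to_new = {}
--     offset = 0
--     insertion_counts = {}
--
--     # Count how many insertions happen after each position
--     for pos in insertion_positions:
--         insertion_counts[pos] = insertion_counts.get(pos, 0) + 1
--
--     for old_idx in range(old_n_layers):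
--         old_to_new[old_idx] = old_idx + offset
--         # Add offset for insertions that happen after this layer
--         if old_idx in insertion_counts:
--             offset += insertion_counts[old_idx]
--
--     return old_to_new
-- ===== SOURCE B (Python) =====
-- from typing import Optional, Dict, Any, Tuple, List
--
-- def _create_layer_mapping(old_n_layers: int, insertion_positions: List[int]) -> Dict[int, int]:
--     """Create mapping from old layer indices to new layer indices.
--
--     Sort the (relevant, non-negative) insertion positions once, then sweep
--     a single pointer over them in step with the layer indices: the pointer's
--     value is exactly the number of insertions strictly before each layer.
--     """
--     pos = sorted(p for p in insertion_positions if p >= 0)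
--     mapping = {}
--     j = 0
--     for old_idx in range(old_n_layers):
--         while j < len(pos) and pos[j] < old_idx:
--             j += 1
--         mapping[old_idx] = old_idx + j
--     return mapping
-- ===== Notes on version B (the rewrite author's own statement) =====
-- stated objective: alternative
-- what changed: Replaces A's per-position count dictionary plus running-offset accumulation with a sort-then-two-pointer sweep: positions are sorted once and a single pointer advanced in step with the layer indices gives each layer's offset directly.
import Mathlib
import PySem

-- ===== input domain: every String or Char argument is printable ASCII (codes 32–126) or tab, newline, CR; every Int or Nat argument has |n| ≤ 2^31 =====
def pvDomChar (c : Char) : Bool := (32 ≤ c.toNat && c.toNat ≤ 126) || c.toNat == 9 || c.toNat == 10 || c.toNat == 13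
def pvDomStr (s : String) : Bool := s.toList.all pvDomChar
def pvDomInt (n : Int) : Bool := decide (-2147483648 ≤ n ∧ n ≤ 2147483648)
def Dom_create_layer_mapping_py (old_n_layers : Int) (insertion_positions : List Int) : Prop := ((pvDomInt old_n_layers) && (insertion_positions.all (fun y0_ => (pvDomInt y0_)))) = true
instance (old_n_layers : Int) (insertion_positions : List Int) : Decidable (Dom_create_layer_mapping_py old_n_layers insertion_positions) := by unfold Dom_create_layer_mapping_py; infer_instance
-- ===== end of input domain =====

-- B replaces A's per-position count dict + running offset with a sort-then-two-pointer sweep (alternative algorithm, similar cost).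


-- ===== PORT A =====
def create_layer_mapping_py (old_n_layers : Int) (insertion_positions : List Int) : List (Int × Int) :=
  let counts := insertion_positions.foldl
    (fun (d : PySem.Dict Int Int) pos => d.insert pos (d.getD pos 0 + 1)) PySem.Dict.empty
  let fin := (PySem.List.pyRange 0 old_n_layers 1).foldl
    (fun (st : PySem.Dict Int Int × Int) idx =>
      let m := st.1.insert idx (idx + st.2)
      if counts.contains idx then (m, st.2 + counts.getD idx 0) else (m, st.2))
    (PySem.Dict.empty, 0)
  fin.1.items

-- ===== PORT B =====
-- the `while j < len(pos) and pos[j] < old_idx: j += 1` loop, with the already-passed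
-- prefix dropped from the list instead of indexed past (j is the same running count)
def pvAdvance (rest : List Int) (idx : Int) (j : Int) : List Int × Int :=
  match rest with
  | [] => ([], j)
  | p :: r => if p < idx then pvAdvance r idx (j + 1) else (p :: r, j)

def create_layer_mapping_py_alt (old_n_layers : Int) (insertion_positions : List Int) : List (Int × Int) :=
  let pos := PySem.List.sorted (insertion_positions.filter (fun p => decide (0 ≤ p))) (fun p => p)
  let fin := (PySem.List.pyRange 0 old_n_layers 1).foldl
    (fun (st : List (Int × Int) × List Int × Int) idx =>
      let aj := pvAdvance st.2.1 idx st.2.2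
      (st.1 ++ [(idx, idx + aj.2)], aj.1, aj.2))
    ([], pos, 0)
  fin.1

-- ===== PRECONDITION & SPEC =====
def Spec_create_layer_mapping_py (old_n_layers : Int) (insertion_positions : List Int) (out : List (Int × Int)) : Prop := out = create_layer_mapping_py_alt old_n_layers insertion_positions
instance (old_n_layers : Int) (insertion_positions : List Int) (out : List (Int × Int)) : Decidable (Spec_create_layer_mapping_py old_n_layers insertion_positions out) := by unfold Spec_create_layer_mapping_py; infer_instance

-- ===== CLAIM (what is proved, stated in full; the proofs are below) =====
def Claim_equal_create_layer_mapping_py : Prop := ∀ (old_n_layers : Int) (insertion_positions : List Int), Dom_create_layer_mapping_py old_n_layers insertion_positions → Spec_create_layer_mapping_py old_n_layers insertion_positions (create_layer_mapping_py old_n_layers insertion_positions)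

-- ===== LEMMAS AND PROOFS =====

def pvCnt (ps : List Int) (i : Int) : Nat := ps.countP (fun p => decide (0 ≤ p ∧ p < i))

def pvCanon (ps : List Int) (k : Nat) : List (Int × Int) :=
  (List.range k).map (fun i => ((i : Int), (i : Int) + (pvCnt ps (i : Int) : Int)))

lemma pvCnt_succ (ps : List Int) (i : Int) (h : 0 ≤ i) :
    pvCnt ps (i + 1) = pvCnt ps i + ps.count i := by
  induction ps with
  | nil => simp [pvCnt]
  | cons a t ih =>
    simp only [pvCnt, List.countP_cons, List.count_cons] at ih ⊢
    rw [ih]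
    simp only [decide_eq_true_eq, beq_iff_eq]
    split_ifs <;> omega


def pvIdxs (k : Nat) : List Int := List.map (fun i : Nat => (i : Int)) (List.range k)

lemma pvIdxs_succ (k : Nat) : pvIdxs (k + 1) = pvIdxs k ++ [(k : Int)] := by
  simp [pvIdxs, List.range_succ]

lemma pvCnt_zero (ps : List Int) : pvCnt ps 0 = 0 := by
  simp only [pvCnt, List.countP_eq_zero]
  intro p _
  simp

lemma pvCanon_contains (ps : List Int) (k : Nat) :
    (PySem.Dict.mk (pvCanon ps k)).contains (k : Int) = false := by
  simp [PySem.Dict.contains, pvCanon]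
  omega

lemma pvA_loop (ps : List Int) (k : Nat) :
    (pvIdxs k).foldl
      (fun (st : PySem.Dict Int Int × Int) idx =>
        if (PySem.Dict.counter ps).contains idx
        then (st.1.insert idx (idx + st.2), st.2 + (PySem.Dict.counter ps).getD idx 0)
        else (st.1.insert idx (idx + st.2), st.2))
      (PySem.Dict.empty, 0)
    = (PySem.Dict.mk (pvCanon ps k), (pvCnt ps k : Int)) := by
  induction k with
  | zero => simp [pvIdxs, pvCanon, pvCnt_zero, PySem.Dict.empty]
  | succ k ih =>
    rw [pvIdxs_succ, List.foldl_append, ih]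
    simp only [List.foldl_cons, List.foldl_nil]
    have hins : (PySem.Dict.mk (pvCanon ps k)).insert (k : Int) ((k : Int) + (pvCnt ps k : Int))
        = PySem.Dict.mk (pvCanon ps (k + 1)) := by
      simp only [PySem.Dict.insert, pvCanon_contains]
      simp [pvCanon, List.range_succ]
    have hcnt : (pvCnt ps ((k : Int) + 1) : Int) = (pvCnt ps (k : Int) : Int) + (ps.count (k : Int) : Int) := by
      rw [pvCnt_succ ps k (by positivity)]; push_cast; ring
    have harg : ((k + 1 : Nat) : Int) = (k : Int) + 1 := by push_cast; ring
    rw [harg]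
    by_cases hmem : (k : Int) ∈ ps
    · simp only [PySem.Dict.contains_counter, List.contains_eq_mem, hmem, decide_true, if_true,
        PySem.Dict.getD_counter, hins, hcnt]
    · have hc0 : ps.count (k : Int) = 0 := List.count_eq_zero.mpr hmem
      simp only [PySem.Dict.contains_counter, List.contains_eq_mem, hmem, decide_false, hins, hcnt, hc0]
      simp

lemma pvAdvance_eq (l : List Int) (i j : Int) :
    pvAdvance l i j = (l.dropWhile (fun p => decide (p < i)),
      j + ((l.takeWhile (fun p => decide (p < i))).length : Int)) := by
  induction l generalizing j with
  | nil => simp [pvAdvance]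
  | cons a t ih =>
    simp only [pvAdvance, List.dropWhile_cons, List.takeWhile_cons]
    by_cases h : a < i
    · simp only [h, decide_true, if_true, ih, List.length_cons]
      congr 1
      push_cast; ring
    · simp [h]

lemma pvDropWhile_dropWhile (l : List Int) (a b : Int) (h : a ≤ b) :
    (l.dropWhile (fun p => decide (p < a))).dropWhile (fun p => decide (p < b))
      = l.dropWhile (fun p => decide (p < b)) := by
  induction l with
  | nil => simp
  | cons x t ih =>
    by_cases hx : x < a
    · have hxb : x < b := by omega
      simp [hx, hxb, ih]
    · simp [List.dropWhile_cons, hx]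

lemma pvTakeWhile_add (l : List Int) (a b : Int) (h : a ≤ b) :
    (l.takeWhile (fun p => decide (p < a))).length
      + ((l.dropWhile (fun p => decide (p < a))).takeWhile (fun p => decide (p < b))).length
      = (l.takeWhile (fun p => decide (p < b))).length := by
  induction l with
  | nil => simp
  | cons x t ih =>
    by_cases hx : x < a
    · have hxb : x < b := by omega
      simp [hx, hxb]
      omega
    · simp [List.takeWhile_cons, hx]

lemma pvSorted_countP (l : List Int) (hs : List.Pairwise (· ≤ ·) l) (i : Int) :
    l.countP (fun p => decide (p < i)) = (l.takeWhile (fun p => decide (p < i))).length := by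
  induction l with
  | nil => simp
  | cons x t ih =>
    rcases List.pairwise_cons.mp hs with ⟨hx, ht⟩
    by_cases h : x < i
    · simp [h, ih ht]
    · have : t.countP (fun p => decide (p < i)) = 0 := by
        rw [List.countP_eq_zero]
        intro p hp
        have := hx p hp
        simp; omega
      simp [h, this]

def pvPos (ps : List Int) : List Int :=
  PySem.List.sorted (ps.filter (fun p => decide (0 ≤ p))) (fun p => p)

lemma pvPos_nonneg (ps : List Int) : ∀ x ∈ pvPos ps, 0 ≤ x := by
  intro x hx
  have := (PySem.List.sorted_perm (ps.filter (fun p => decide (0 ≤ p))) (fun p => p) false).mem_iff.mp hx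
  have := List.of_mem_filter this
  simpa using this

lemma pvPos_pairwise (ps : List Int) : List.Pairwise (· ≤ ·) (pvPos ps) :=
  PySem.List.sorted_pairwise (ps.filter (fun p => decide (0 ≤ p))) (fun p => p)

lemma pvTW_eq_cnt (ps : List Int) (i : Int) :
    ((pvPos ps).takeWhile (fun p => decide (p < i))).length = pvCnt ps i := by
  rw [← pvSorted_countP (pvPos ps) (pvPos_pairwise ps) i]
  simp only [pvPos]
  rw [(PySem.List.sorted_perm (ps.filter (fun p => decide (0 ≤ p))) (fun p => p) false).countP_eq]
  rw [List.countP_filter]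
  simp only [pvCnt]
  congr 1
  funext p
  simp [and_comm]

lemma pvDropWhile_nonneg (ps : List Int) :
    (pvPos ps).dropWhile (fun p => decide (p < 0)) = pvPos ps := by
  cases h : pvPos ps with
  | nil => simp
  | cons x t =>
    have hx : 0 ≤ x := pvPos_nonneg ps x (by rw [h]; exact List.mem_cons_self)
    simp [List.dropWhile_cons]
    omega

def pvSig (k : Nat) : Int := if k = 0 then 0 else (k : Int) - 1

lemma pvB_loop (ps : List Int) (k : Nat) :
    (pvIdxs k).foldl
      (fun (st : List (Int × Int) × List Int × Int) idx =>
        (st.1 ++ [(idx, idx + (pvAdvance st.2.1 idx st.2.2).2)], (pvAdvance st.2.1 idx st.2.2).1,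
          (pvAdvance st.2.1 idx st.2.2).2))
      ([], pvPos ps, 0)
    = (pvCanon ps k, (pvPos ps).dropWhile (fun p => decide (p < pvSig k)),
       (((pvPos ps).takeWhile (fun p => decide (p < pvSig k))).length : Int)) := by
  induction k with
  | zero =>
    have h0 : pvSig 0 = 0 := rfl
    simp only [pvIdxs, List.range_zero, List.map_nil, List.foldl_nil, h0]
    rw [pvDropWhile_nonneg, pvTW_eq_cnt, pvCnt_zero]
    simp [pvCanon]
  | succ k ih =>
    rw [pvIdxs_succ, List.foldl_append, ih]
    simp only [List.foldl_cons, List.foldl_nil, pvAdvance_eq]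
    have hle : pvSig k ≤ (k : Int) := by
      simp only [pvSig]; split <;> omega
    have hsig : pvSig (k + 1) = (k : Int) := by simp [pvSig]
    rw [pvDropWhile_dropWhile _ _ _ hle, hsig]
    have htw : ((((pvPos ps).takeWhile (fun p => decide (p < pvSig k))).length : Int)
        + ((((pvPos ps).dropWhile (fun p => decide (p < pvSig k))).takeWhile (fun p => decide (p < (k : Int)))).length : Int))
        = (((pvPos ps).takeWhile (fun p => decide (p < (k : Int)))).length : Int) := by
      rw [← Nat.cast_add]
      exact_mod_cast congrArg (Nat.cast (R := Int)) (pvTakeWhile_add (pvPos ps) (pvSig k) (k : Int) hle)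
    rw [htw, pvTW_eq_cnt]
    simp [pvCanon, List.range_succ]

lemma pvRange_neg (n : Int) (h : n < 0) : PySem.List.pyRange 0 n 1 = [] := by
  simp [PySem.List.pyRange]; omega

-- ===== VERDICT (by name: the statement is the Claim_ definition above) =====
theorem create_layer_mapping_py_spec : Claim_equal_create_layer_mapping_py := by
  intro n ps _
  unfold Spec_create_layer_mapping_py
  simp only [create_layer_mapping_py, create_layer_mapping_py_alt]
  rw [PySem.Dict.foldl_insert_getD_add_one_eq_counter]
  rw [show (PySem.List.sorted (ps.filter (fun p => decide (0 ≤ p))) (fun p => p)) = pvPos ps from rfl]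
  rcases Int.lt_or_le n 0 with hn | hn
  · rw [pvRange_neg n hn]
    simp [PySem.Dict.empty]
  · have hrange : PySem.List.pyRange 0 n 1 = pvIdxs n.toNat := by
      conv_lhs => rw [← Int.toNat_of_nonneg hn]
      rw [PySem.List.pyRange_zero_natCast]
      simp only [pvIdxs]
    rw [hrange, pvA_loop, pvB_loop]
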